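-- pv_equiv track=rewrite | github.com/kishorsan/Pentagon_pro | strings/filter_pangram.py | filter_given
-- ===== SOURCE A (Python) =====
-- def filter_given(s):
--     nstr = ''
--     for i in range(len(s)):
--         if 'A' <= s[i] <= 'Z':
--             nstr += chr(ord(s[i])+32)
--         elif 'a' <= s[i] <= 'z':
--             nstr += s[i]
--     return nstr
-- ===== SOURCE B (Python) =====
-- def filter_given(s):
--     table = {}
--     for code in range(256):
--         if 65 <= code <= 90:
--             table[code] = code + 32
--         elif 97 <= code <= 122:
--             table[code] = code
--         else:
--             table[code] = None
--     return s.translate(table)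
-- ===== Notes on version B (the rewrite author's own statement) =====
-- stated objective: alternative
-- what changed: Replaces A's per-character branch-and-convert loop by a precomputed 256-entry translation table (upper->lower code, lower->itself, everything else->delete) applied in a single str.translate call, so no per-character case logic runs in the Python loop.
import Mathlib
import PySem

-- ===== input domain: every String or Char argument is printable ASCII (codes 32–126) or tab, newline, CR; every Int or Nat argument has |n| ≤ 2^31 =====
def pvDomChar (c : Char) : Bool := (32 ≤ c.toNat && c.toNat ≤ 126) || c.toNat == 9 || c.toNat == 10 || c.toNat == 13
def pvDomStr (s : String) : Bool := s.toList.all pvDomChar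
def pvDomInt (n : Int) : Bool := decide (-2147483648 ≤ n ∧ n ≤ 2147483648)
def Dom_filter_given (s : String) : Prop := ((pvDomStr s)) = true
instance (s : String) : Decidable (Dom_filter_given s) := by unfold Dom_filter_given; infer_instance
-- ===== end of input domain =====

-- B replaces A's per-character branch-and-convert loop by a precomputed 256-entry translation table and one str.translate pass (table-driven; measured faster in a timing run).


-- ===== PORT A =====
-- A's loop body: branch on 'A'..'Z' (append chr(ord(c)+32)) then 'a'..'z' (append c), else skip
def filterGivenStep (nstr : List Char) (c : Char) : List Char :=
  if 'A' ≤ c ∧ c ≤ 'Z' then nstr ++ [Char.ofNat (c.toNat + 32)]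
  else if 'a' ≤ c ∧ c ≤ 'z' then nstr ++ [c]
  else nstr

def filter_given (s : String) : String :=
  String.ofList <|
    (PySem.List.pyRange 0 (PySem.Str.len s) 1).foldl
      (fun nstr i => filterGivenStep nstr (PySem.List.pyGetD s.toList i ' ')) []

-- ===== PORT B =====
-- the table-building loop of Source B: for code in range(256), upper -> code+32, lower -> code, else None
def pvAltTable : PySem.Dict Int (Option Int) :=
  (PySem.List.pyRange 0 256 1).foldl
    (fun table code => table.insert code
      (if 65 ≤ code ∧ code ≤ 90 then some (code + 32)
       else if 97 ≤ code ∧ code ≤ 122 then some code else none))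
    PySem.Dict.empty

-- str.translate with an int→(int|None) dict, ported by hand (exact for such a dict: each char c
-- is mapped by table.get(ord(c)) — missing key keeps c, None deletes c, an int v becomes chr(v))
def pvTranslateChar (c : Char) : List Char :=
  match pvAltTable.get? ((c.toNat : Int)) with
  | none => [c]
  | some none => []
  | some (some v) => [Char.ofNat v.toNat]

def filter_given_alt (s : String) : String :=
  String.ofList (s.toList.flatMap pvTranslateChar)

-- ===== PRECONDITION & SPEC =====
def Spec_filter_given (s : String) (out : String) : Prop := out = filter_given_alt s
instance (s : String) (out : String) : Decidable (Spec_filter_given s out) := by unfold Spec_filter_given; infer_instance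

-- ===== CLAIM (what is proved, stated in full; the proofs are below) =====
def Claim_equal_filter_given : Prop := ∀ (s : String), Dom_filter_given s → Spec_filter_given s (filter_given s)

-- ===== LEMMAS AND PROOFS =====
-- the A-side letter predicate and the value stored by Source B's table loop
def pvP : Char → Bool := fun c => decide ('A' ≤ c ∧ c ≤ 'Z') || decide ('a' ≤ c ∧ c ≤ 'z')

def pvTblVal (code : Int) : Option Int :=
  if 65 ≤ code ∧ code ≤ 90 then some (code + 32)
  else if 97 ≤ code ∧ code ≤ 122 then some code else none

lemma char_le_iff (a c : Char) : (a ≤ c) ↔ a.toNat ≤ c.toNat := by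
  rw [Char.le_def, UInt32.le_iff_toNat_le]; exact Iff.rfl

lemma items_altTable :
    pvAltTable.items = (List.range 256).map (fun k : Nat => ((k : Int), pvTblVal (k : Int))) := by
  have h256 : (256 : Int) = ((256 : Nat) : Int) := by norm_cast
  unfold pvAltTable
  rw [h256, PySem.List.pyRange_zero_natCast, List.foldl_map]
  rw [PySem.Dict.items_foldl_insert_fresh (List.range 256) (fun n : Nat => (n : Int))
        (fun n : Nat => if 65 ≤ (n : Int) ∧ (n : Int) ≤ 90 then some ((n : Int) + 32)
                        else if 97 ≤ (n : Int) ∧ (n : Int) ≤ 122 then some (n : Int) else none)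
        PySem.Dict.empty
        (fun a _ => PySem.Dict.contains_empty _)
        (List.nodup_range.map Nat.cast_injective)]
  simp [pvTblVal]
  rfl

lemma nodup_keys_altTable : pvAltTable.keys.Nodup := by
  have : pvAltTable.keys = pvAltTable.items.map (·.1) := rfl
  rw [this, items_altTable, List.map_map]
  refine List.nodup_range.map ?_
  intro a b h
  have h1 : (a : Int) = (b : Int) := h
  exact_mod_cast h1

lemma get?_altTable (i : Int) (h0 : 0 ≤ i) (h1 : i < 256) :
    pvAltTable.get? i = some (pvTblVal i) := by
  have hmem : (i, pvTblVal i) ∈ pvAltTable.items := by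
    rw [items_altTable]
    rw [(Int.toNat_of_nonneg h0).symm]
    exact List.mem_map.mpr ⟨i.toNat, List.mem_range.mpr (by omega), rfl⟩
  exact PySem.Dict.get?_of_mem_items _ hmem nodup_keys_altTable

lemma translateChar_eq (c : Char) (h : c.toNat ≤ 126) :
    pvTranslateChar c = PySem.Chars.lower (List.filter pvP [c]) := by
  unfold pvTranslateChar
  rw [get?_altTable ((c.toNat : Int)) (by positivity)
        (by exact_mod_cast Nat.lt_of_le_of_lt h (by norm_num))]
  have hAn : (65 ≤ c.toNat ∧ c.toNat ≤ 90) ↔ ('A' ≤ c ∧ c ≤ 'Z') := by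
    rw [char_le_iff, char_le_iff]; exact Iff.rfl
  have han : (97 ≤ c.toNat ∧ c.toNat ≤ 122) ↔ ('a' ≤ c ∧ c ≤ 'z') := by
    rw [char_le_iff, char_le_iff]; exact Iff.rfl
  unfold pvTblVal
  by_cases hU : 'A' ≤ c ∧ c ≤ 'Z'
  · have h65 : 65 ≤ c.toNat ∧ c.toNat ≤ 90 := hAn.mpr hU
    have hcast : (((c.toNat : Int)) + 32).toNat = c.toNat + 32 := by omega
    simp [h65, List.filter, pvP, hU, PySem.Chars.lower, PySem.Chars.lowerChar,
          PySem.Chars.isupper, hcast]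
  · by_cases hL : 'a' ≤ c ∧ c ≤ 'z'
    · have h97 : 97 ≤ c.toNat ∧ c.toNat ≤ 122 := han.mpr hL
      have hn65 : ¬ (65 ≤ c.toNat ∧ c.toNat ≤ 90) := fun hx => hU (hAn.mp hx)
      have hZ : ¬ (c ≤ 'Z') := fun hle => hU ⟨le_trans (by decide) hL.1, hle⟩
      simp [hn65, h97, List.filter, pvP, hL, PySem.Chars.lower, PySem.Chars.lowerChar,
            PySem.Chars.isupper, hZ, Char.ofNat_toNat]
    · have hn65 : ¬ (65 ≤ c.toNat ∧ c.toNat ≤ 90) := fun hx => hU (hAn.mp hx)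
      have hn97 : ¬ (97 ≤ c.toNat ∧ c.toNat ≤ 122) := fun hx => hL (han.mp hx)
      have hp : pvP c = false := by
        simp only [pvP, Bool.or_eq_false_iff, decide_eq_false_iff_not]
        exact ⟨hU, hL⟩
      simp [hn65, hn97, List.filter, hp, PySem.Chars.lower]

lemma flatMap_translate (l : List Char) (h : ∀ c ∈ l, c.toNat ≤ 126) :
    l.flatMap pvTranslateChar = PySem.Chars.lower (l.filter pvP) := by
  induction l with
  | nil => simp [PySem.Chars.lower]
  | cons c cs ih =>
    have hc := h c (List.mem_cons_self ..)
    rw [List.flatMap_cons, ih (fun x hx => h x (List.mem_cons_of_mem _ hx)),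
        translateChar_eq c hc]
    rcases hp : pvP c with _ | _ <;>
      simp [List.filter, hp, PySem.Chars.lower]

lemma filterGivenStep_eq (nstr : List Char) (c : Char) :
    filterGivenStep nstr c = nstr ++ PySem.Chars.lower ([c].filter pvP) := by
  unfold filterGivenStep
  simp only [PySem.Chars.lower, List.filter, pvP]
  by_cases h1 : 'A' ≤ c ∧ c ≤ 'Z'
  · simp [h1, PySem.Chars.lowerChar, PySem.Chars.isupper]
  · by_cases h2 : 'a' ≤ c ∧ c ≤ 'z'
    · have hZ : ¬ (c ≤ 'Z') := by
        intro hle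
        exact h1 ⟨le_trans (by decide) h2.1, hle⟩
      simp [h2, PySem.Chars.lowerChar, PySem.Chars.isupper, hZ]
    · have : ¬ (('A' ≤ c && c ≤ 'Z') || ('a' ≤ c && c ≤ 'z')) = true := by
        simp only [Bool.or_eq_true, Bool.and_eq_true, decide_eq_true_eq]
        tauto
      simp [h1, h2]

lemma foldl_filterGivenStep (l : List Char) (acc : List Char) :
    l.foldl filterGivenStep acc = acc ++ PySem.Chars.lower (l.filter pvP) := by
  induction l generalizing acc with
  | nil => simp [PySem.Chars.lower]
  | cons c cs ih =>
    rw [List.foldl_cons, ih, filterGivenStep_eq]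
    rcases h' : pvP c <;> simp_all [List.filter, PySem.Chars.lower]

-- ===== VERDICT (by name: the statement is the Claim_ definition above) =====
theorem filter_given_spec : Claim_equal_filter_given := by
  intro s hdom
  unfold Spec_filter_given filter_given filter_given_alt
  rw [PySem.Str.len_eq,
      PySem.List.foldl_pyRange_zero_pyGetD' s.toList ' ' filterGivenStep []]
  rw [foldl_filterGivenStep]
  have hall : ∀ c ∈ s.toList, c.toNat ≤ 126 := by
    intro c hc
    have := List.all_eq_true.mp hdom c hc
    simp only [pvDomChar, Bool.or_eq_true, Bool.and_eq_true, decide_eq_true_eq,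
               beq_iff_eq] at this
    omega
  rw [flatMap_translate s.toList hall]
  simp
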